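-- pv_equiv track=rewrite | github.com/jueoneom/algorithm_study | week3/lv3_탐색_큐_예산_선정.py | solution
-- ===== SOURCE A (Python) =====
-- def solution(budgets, M):
--     min_per_budget = 0
--     max_per_budget = max(budgets)
--
--     while min_per_budget <= max_per_budget:
--         mid = (min_per_budget + max_per_budget) // 2
--         total_budget = sum([min(mid, budget) for budget in budgets])
--         if total_budget > M:
--             max_per_budget = mid - 1
--         elif total_budget <= M:
--             min_per_budget = mid + 1
--
--
--     return min_per_budget - 1
-- ===== SOURCE B (Python) =====
-- def solution(budgets, M):
--     # Sort once, then one linear pass: at step i the k remaining requests all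
--     # want at least b, so the first time b * k exceeds the remaining money the
--     # answer is the remaining money split evenly, rem // k; if the money never
--     # runs out, the cap is the largest request.
--     bs = sorted(budgets)
--     rem = M
--     for i, b in enumerate(bs):
--         k = len(bs) - i
--         if b * k > rem:
--             return rem // k
--         rem -= b
--     return bs[-1]
-- ===== Notes on version B (the rewrite author's own statement) =====
-- stated objective: faster
-- what changed: Replaces A's binary search over the cap value (each step re-summing min(mid,b) over all budgets) with one sort followed by a single greedy pass keeping the remaining money and computing the cap by one floor division at the breakpoint; Pre_ restricts to the task's natural domain (nonempty requests with a nonnegative maximum and nonnegative total budget M), outside which A's -1 (from min_per_budget-1 with the loop skipped or never fitting) is an accident of its search range starting at 0 and the empty list makes both raise.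
-- outside the precondition, e.g. on solution([2, 2], -5): A returns -1, B returns -3; on solution([-44, -24], 182): A returns -1, B returns -24; on solution([], 5): A raises ValueError, B raises IndexError
import Mathlib
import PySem

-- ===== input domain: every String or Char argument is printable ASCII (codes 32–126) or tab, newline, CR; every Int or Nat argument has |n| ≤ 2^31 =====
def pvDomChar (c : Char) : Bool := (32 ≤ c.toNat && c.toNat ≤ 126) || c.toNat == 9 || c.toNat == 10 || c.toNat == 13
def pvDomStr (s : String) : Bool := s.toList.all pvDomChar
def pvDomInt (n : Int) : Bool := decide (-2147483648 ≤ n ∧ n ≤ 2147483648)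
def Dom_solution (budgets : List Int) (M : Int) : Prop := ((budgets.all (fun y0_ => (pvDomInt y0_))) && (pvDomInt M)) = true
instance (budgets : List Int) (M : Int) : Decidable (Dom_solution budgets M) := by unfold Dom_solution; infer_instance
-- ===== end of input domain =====

-- B replaces A's binary search over the cap value by one sort and a single
-- greedy pass with a running remainder; proved equal on the task's natural
-- domain (nonempty requests with a nonnegative maximum, nonnegative M).

-- ===== PORT A =====
-- the while loop: state (min_per_budget, max_per_budget), terminates because hi - lo shrinks
def goA (budgets : List Int) (M : Int) (lo hi : Int) : Int :=
  if h : lo ≤ hi then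
    let mid := PySem.Int.floordiv (lo + hi) 2
    if (budgets.map (fun b => min mid b)).sum > M then
      goA budgets M lo (mid - 1)
    else
      goA budgets M (mid + 1) hi
  else lo - 1
termination_by (hi + 1 - lo).toNat
decreasing_by
  · have := PySem.Int.floordiv_two_mid_bounds h; omega
  · have := PySem.Int.floordiv_two_mid_bounds h; omega

def solution (budgets : List Int) (M : Int) : Int :=
  match PySem.List.max? budgets (fun x => x) with
  | none => 0   -- dead under Pre_: max([]) raises ValueError
  | some mx => goA budgets M 0 mx

-- ===== PORT B =====
-- the for loop over the sorted list: k = n - i is the length of the remaining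
-- suffix; `lastv` is bs[-1], returned when the money never runs out
def goB (lastv : Int) (rem : Int) : List Int → Int
  | [] => lastv
  | b :: rest =>
    let k : Int := (rest.length : Int) + 1
    if b * k > rem then PySem.Int.floordiv rem k
    else goB lastv (rem - b) rest

def solution_alt (budgets : List Int) (M : Int) : Int :=
  let bs := PySem.List.sorted budgets (fun x => x) false
  goB (PySem.List.pyGetD bs (-1) 0) M bs

-- ===== PRECONDITION & SPEC =====
-- Pre_ restricts to the task's natural domain: a nonempty request list whose
-- maximum is nonnegative and a nonnegative total budget M. The empty list
-- makes both programs raise (ValueError / IndexError); with negative M or an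
-- all-negative list, A's -1 (min_per_budget - 1 with the loop skipped or
-- never fitting) is an accident of its search range starting at 0.
def Pre_solution (budgets : List Int) (M : Int) : Prop :=
  budgets ≠ [] ∧ budgets.any (fun b => 0 ≤ b) = true ∧ 0 ≤ M
instance (budgets : List Int) (M : Int) : Decidable (Pre_solution budgets M) := by unfold Pre_solution; infer_instance
def pvWitness_solution : List Int × Int := ([1, 5, 3], 7)

def Spec_solution (budgets : List Int) (M : Int) (out : Int) : Prop := out = solution_alt budgets M
instance (budgets : List Int) (M : Int) (out : Int) : Decidable (Spec_solution budgets M out) := by unfold Spec_solution; infer_instance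

-- ===== CLAIM (what is proved, stated in full; the proofs are below) =====
def Claim_equal_solution : Prop := ∀ (budgets : List Int) (M : Int), Dom_solution budgets M → Pre_solution budgets M → Spec_solution budgets M (solution budgets M)

-- ===== LEMMAS AND PROOFS =====

/-- total spend when every budget is capped at `c` -/
def fsum (budgets : List Int) (c : Int) : Int := (budgets.map (fun b => min c b)).sum

/-- the characterisation both programs satisfy: `r` is the largest cap in `[0, mx]`
    whose total spend fits in `M`, or `-1` (resp. `max mx (-1)` when that range is empty). -/
def QQ (budgets : List Int) (M mx r : Int) : Prop :=
  -1 ≤ r ∧ r ≤ max mx (-1) ∧ (r = -1 ∨ (0 ≤ r ∧ fsum budgets r ≤ M)) ∧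
    (r = max mx (-1) ∨ M < fsum budgets (r + 1))

theorem fsum_mono (budgets : List Int) {c c' : Int} (h : c ≤ c') :
    fsum budgets c ≤ fsum budgets c' := by
  unfold fsum
  induction budgets with
  | nil => simp
  | cons b t ih => simp only [List.map_cons, List.sum_cons]; gcongr

theorem fsum_perm {l l' : List Int} (h : l.Perm l') (c : Int) : fsum l c = fsum l' c :=
  (h.map _).sum_eq

theorem QQ_unique {budgets : List Int} {M mx r r' : Int}
    (h : QQ budgets M mx r) (h' : QQ budgets M mx r') : r = r' := by
  obtain ⟨h1, h2, h3, h4⟩ := h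
  obtain ⟨h1', h2', h3', h4'⟩ := h'
  by_contra hne
  rcases lt_trichotomy r r' with hlt | heq | hlt
  · rcases h3' with rfl | ⟨hr0', hf'⟩
    · omega
    · rcases h4 with rfl | hf
      · omega
      · have := fsum_mono budgets (show r + 1 ≤ r' by omega); omega
  · exact hne heq
  · rcases h3 with rfl | ⟨hr0, hf⟩
    · omega
    · rcases h4' with rfl | hf'
      · omega
      · have := fsum_mono budgets (show r' + 1 ≤ r by omega); omega

theorem goA_exit (budgets : List Int) (M mx lo hi : Int)
    (hlo : 0 ≤ lo) (hhi : hi ≤ mx) (hgt : hi < lo)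
    (hshape : lo - 1 ≤ hi ∨ (lo = 0 ∧ hi = mx))
    (hL : lo = 0 ∨ fsum budgets (lo - 1) ≤ M)
    (hR : hi = mx ∨ M < fsum budgets (hi + 1)) :
    QQ budgets M mx (lo - 1) := by
  rcases hshape with hsh | ⟨rfl, rfl⟩
  · have hhieq : hi = lo - 1 := by omega
    refine ⟨by omega, by omega, ?_, ?_⟩
    · by_cases hlo0 : lo = 0
      · exact Or.inl (by omega)
      · rcases hL with rfl | hf
        · omega
        · exact Or.inr ⟨by omega, hf⟩
    · rcases hR with rfl | hf
      · exact Or.inl (by omega)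
      · refine Or.inr ?_
        rw [show lo - 1 + 1 = hi + 1 from by omega]
        exact hf
  · exact ⟨by omega, by omega, Or.inl (by omega), Or.inl (by omega)⟩

theorem goA_Q (budgets : List Int) (M mx : Int) :
    ∀ (n : Nat) (lo hi : Int), (hi + 1 - lo).toNat ≤ n → 0 ≤ lo → hi ≤ mx →
      (lo - 1 ≤ hi ∨ (lo = 0 ∧ hi = mx)) →
      (lo = 0 ∨ fsum budgets (lo - 1) ≤ M) →
      (hi = mx ∨ M < fsum budgets (hi + 1)) →
      QQ budgets M mx (goA budgets M lo hi) := by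
  intro n
  induction n with
  | zero =>
    intro lo hi hn hlo hhi hshape hL hR
    rw [goA]
    split
    · omega
    · exact goA_exit budgets M mx lo hi hlo hhi (by omega) hshape hL hR
  | succ n ih =>
    intro lo hi hn hlo hhi hshape hL hR
    rw [goA]
    split
    · rename_i h
      have hmid := PySem.Int.floordiv_two_mid_bounds h
      show QQ budgets M mx
        (if (budgets.map (fun b => min (PySem.Int.floordiv (lo + hi) 2) b)).sum > M then
          goA budgets M lo (PySem.Int.floordiv (lo + hi) 2 - 1)
        else goA budgets M (PySem.Int.floordiv (lo + hi) 2 + 1) hi)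
      set mid := PySem.Int.floordiv (lo + hi) 2 with hm
      split
      · rename_i htot
        refine ih lo (mid - 1) (by omega) hlo (by omega) (by omega) hL (Or.inr ?_)
        rw [show mid - 1 + 1 = mid from by omega]
        simpa [fsum] using htot
      · rename_i htot
        refine ih (mid + 1) hi (by omega) (by omega) hhi (by omega) (Or.inr ?_) hR
        rw [show mid + 1 - 1 = mid from by omega]
        simpa [fsum] using htot
    · exact goA_exit budgets M mx lo hi hlo hhi (by omega) hshape hL hR

theorem sum_map_min_of_le {l : List Int} {x : Int} (h : ∀ d ∈ l, d ≤ x) :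
    (l.map (fun b => min x b)).sum = l.sum := by
  induction l with
  | nil => rfl
  | cons b t ih =>
    simp only [List.map_cons, List.sum_cons]
    rw [ih (fun d hd => h d (List.mem_cons_of_mem _ hd)),
      min_eq_right (h b (List.mem_cons_self))]

theorem sum_map_min_of_ge {l : List Int} {x : Int} (h : ∀ r ∈ l, x ≤ r) :
    (l.map (fun b => min x b)).sum = (l.length : Int) * x := by
  induction l with
  | nil => simp
  | cons b t ih =>
    simp only [List.map_cons, List.sum_cons, List.length_cons]
    rw [ih (fun r hr => h r (List.mem_cons_of_mem _ hr)),
      min_eq_left (h b (List.mem_cons_self))]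
    push_cast; ring

theorem goB_Q (budgets : List Int) (M : Int) (bs : List Int)
    (hperm : bs.Perm budgets) (hsort : bs.Pairwise (· ≤ ·))
    (mxv : Int) (hmx0 : 0 ≤ mxv) (hmem : mxv ∈ bs) (hmx : ∀ x ∈ bs, x ≤ mxv) :
    ∀ (rest done : List Int) (rem : Int), bs = done ++ rest → rem = M - done.sum →
      0 ≤ rem →
      (∀ d ∈ done, d * (rest.length : Int) ≤ rem) →
      QQ budgets M mxv (goB mxv rem rest) := by
  intro rest
  induction rest with
  | nil =>
    intro done rem hbs hrem hrem0 hinv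
    have hdone : done = bs := by simpa using hbs.symm
    subst hdone
    rw [goB]
    refine ⟨by omega, by omega, Or.inr ⟨hmx0, ?_⟩, Or.inl (by omega)⟩
    rw [← fsum_perm hperm]
    unfold fsum
    rw [sum_map_min_of_le hmx]
    omega
  | cons b rest' ih =>
    intro done rem hbs hrem hrem0 hinv
    rw [goB]
    set k : Int := (rest'.length : Int) + 1 with hk
    have hkpos : (0 : Int) < k := by positivity
    have hbmem : b ∈ bs := by rw [hbs]; simp
    have hblemx : b ≤ mxv := hmx b hbmem
    have hrest' : ∀ r ∈ rest', b ≤ r := by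
      have h1 := (List.pairwise_append.mp (hbs ▸ hsort)).2.1
      exact (List.pairwise_cons.mp h1).1
    have hdb : ∀ d ∈ done, d ≤ b := by
      intro d hd
      exact (List.pairwise_append.mp (hbs ▸ hsort)).2.2 d hd b (by simp)
    split
    · -- trigger: b * k > rem, return rem // k
      rename_i htrig
      set c : Int := PySem.Int.floordiv rem k with hc
      have hck : c * k ≤ rem := by
        have := (PySem.Int.le_floordiv_iff_mul_le (a := rem) (b := k) (q := c) hkpos).mp
          (le_refl c)
        exact this
      have hck' : rem < (c + 1) * k :=
        (PySem.Int.floordiv_lt_iff_lt_mul (a := rem) (b := k) (q := c + 1) hkpos).mp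
          (by omega)
      have hcb : c < b :=
        (PySem.Int.floordiv_lt_iff_lt_mul (a := rem) (b := k) (q := b) hkpos).mpr (by omega)
      have hc0 : 0 ≤ c :=
        (PySem.Int.le_floordiv_iff_mul_le (a := rem) (b := k) (q := 0) hkpos).mpr
          (by omega)
      have hdc : ∀ d ∈ done, d ≤ c := by
        intro d hd
        exact (PySem.Int.le_floordiv_iff_mul_le hkpos).mpr
          (by have := hinv d hd; simpa [hk] using this)
      have hrestb : ∀ r ∈ b :: rest', b ≤ r := by
        intro r hr
        rcases List.mem_cons.mp hr with h | h
        · exact h ▸ le_refl b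
        · exact hrest' r h
      have hf : ∀ x : Int, (∀ d ∈ done, d ≤ x) → x ≤ b →
          fsum budgets x = done.sum + k * x := by
        intro x hxd hxb
        rw [← fsum_perm hperm]
        unfold fsum
        rw [hbs, List.map_append, List.sum_append, sum_map_min_of_le hxd,
          sum_map_min_of_ge (l := b :: rest') (fun r hr => le_trans hxb (hrestb r hr))]
        simp only [List.length_cons, hk]
        push_cast
        ring
      refine ⟨by omega, by omega, Or.inr ⟨hc0, ?_⟩, Or.inr ?_⟩
      · rw [hf c hdc (by omega)]; nlinarith
      · rw [hf (c + 1) (fun d hd => by have := hdc d hd; omega) (by omega)]; nlinarith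
    · -- no trigger: spend b, recurse on rest'
      rename_i htrig
      have hnt : b * k ≤ rem := by omega
      have hble : b ≤ rem := by
        rcases le_or_gt 0 b with hb | hb
        · nlinarith
        · omega
      refine ih (done ++ [b]) (rem - b) (by rw [hbs]; simp) (by simp [hrem]; ring)
        (by omega) ?_
      intro d hd
      rcases List.mem_append.mp hd with hd' | hd'
      · have h1 := hdb d hd'
        have h2 : d * (rest'.length : Int) ≤ b * (rest'.length : Int) := by
          apply mul_le_mul_of_nonneg_right h1; positivity
        nlinarith
      · have : d = b := by simpa using hd'
        subst this
        nlinarith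

theorem sorted_last_is_max (bs : List Int) (h : bs.Pairwise (· ≤ ·)) (hne : bs ≠ []) :
    ∀ x ∈ bs, x ≤ bs.getLast hne := by
  intro x hx
  obtain ⟨i, hi, rfl⟩ := List.mem_iff_getElem.mp hx
  rw [List.getLast_eq_getElem]
  rcases Nat.lt_or_ge i (bs.length - 1) with hlt | hge
  · exact List.pairwise_iff_getElem.mp h i (bs.length - 1) hi (by omega) hlt
  · have hieq : i = bs.length - 1 := by omega
    subst hieq; exact le_refl _

-- ===== VERDICT (by name: the statement is the Claim_ definition above) =====
theorem solution_spec : Claim_equal_solution := by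
  intro budgets M _ hpre
  obtain ⟨hne0, hall, hM⟩ := hpre
  unfold Spec_solution
  set bs := PySem.List.sorted budgets (fun x => x) false with hbsdef
  have hperm : bs.Perm budgets := PySem.List.sorted_perm budgets (fun x => x) false
  have hne : bs ≠ [] := by
    intro h0
    have h1 := hperm.symm
    rw [h0] at h1
    exact hne0 h1.eq_nil
  have hsort : bs.Pairwise (· ≤ ·) := by
    simpa using PySem.List.sorted_pairwise budgets (fun x => x)
  set mxv := bs.getLast hne with hmxv
  have hmem : mxv ∈ bs := List.getLast_mem hne
  have hmax : ∀ x ∈ bs, x ≤ mxv := sorted_last_is_max bs hsort hne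
  have hmx0 : 0 ≤ mxv := by
    obtain ⟨w, hwmem, hw0⟩ := List.any_eq_true.mp hall
    exact le_trans (of_decide_eq_true hw0) (hmax w (hperm.mem_iff.mpr hwmem))
  have hBQ : QQ budgets M mxv (solution_alt budgets M) := by
    have hget : PySem.List.pyGetD bs (-1) 0 = mxv := PySem.List.pyGetD_neg_one bs 0 hne
    show QQ budgets M mxv (goB (PySem.List.pyGetD bs (-1) 0) M bs)
    rw [hget]
    exact goB_Q budgets M bs hperm hsort mxv hmx0 hmem hmax bs [] M rfl (by simp) hM
      (by simp)
  obtain ⟨m, hm⟩ : ∃ m, PySem.List.max? budgets (fun x => x) = some m := by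
    cases h : PySem.List.max? budgets (fun x => x) with
    | none => exact absurd ((PySem.List.max?_eq_none_iff budgets (fun x => x)).mp h) hne0
    | some m => exact ⟨m, rfl⟩
  have hmmem : m ∈ budgets := PySem.List.max?_mem hm
  have hmismax : ∀ y ∈ budgets, y ≤ m := fun y hy => PySem.List.max?_isMax hm y hy
  have hmeq : m = mxv := le_antisymm (hmax m (hperm.mem_iff.mpr hmmem))
    (hmismax mxv (hperm.mem_iff.mp hmem))
  have hAQ : QQ budgets M mxv (solution budgets M) := by
    unfold solution
    rw [hm, hmeq]
    exact goA_Q budgets M mxv ((mxv + 1).toNat) 0 mxv (by omega) (by omega) (le_refl _)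
      (Or.inr ⟨rfl, rfl⟩) (Or.inl rfl) (Or.inl rfl)
  exact QQ_unique hAQ hBQ
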